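-- pv_equiv track=rewrite | github.com/siriocra/aoc2024 | 21.py | calc_dir_pad
-- ===== SOURCE A (Python) =====
-- patterns_id = {'A': 0, '<': 1, '^': 2, 'v': 3, '>': 4}
--
-- def calc_dir_pad(pattern, patterns):
--     ans = 0
--     prev = 'A'
--     for i in range(len(pattern)):
--         ans += patterns[patterns_id[prev]][patterns_id[pattern[i]]]
--         prev = pattern[i]
--     ans += patterns[patterns_id[prev]][patterns_id['A']]
--     return ans
-- ===== SOURCE B (Python) =====
-- patterns_id = {'A': 0, '<': 1, '^': 2, 'v': 3, '>': 4}
--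
-- def calc_dir_pad(pattern, patterns):
--     seq = 'A' + pattern + 'A'
--     pair_counts = {}
--     for p in zip(seq, seq[1:]):
--         pair_counts[p] = pair_counts.get(p, 0) + 1
--     return sum(patterns[patterns_id[a]][patterns_id[b]] * c
--                for (a, b), c in pair_counts.items())
-- ===== Notes on version B (the rewrite author's own statement) =====
-- stated objective: alternative
-- what changed: B replaces the ordered single pass with prev-tracking by building a frequency table of consecutive character pairs of 'A'+pattern+'A' and returning the weighted sum of per-pair costs times multiplicities.
import Mathlib
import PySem

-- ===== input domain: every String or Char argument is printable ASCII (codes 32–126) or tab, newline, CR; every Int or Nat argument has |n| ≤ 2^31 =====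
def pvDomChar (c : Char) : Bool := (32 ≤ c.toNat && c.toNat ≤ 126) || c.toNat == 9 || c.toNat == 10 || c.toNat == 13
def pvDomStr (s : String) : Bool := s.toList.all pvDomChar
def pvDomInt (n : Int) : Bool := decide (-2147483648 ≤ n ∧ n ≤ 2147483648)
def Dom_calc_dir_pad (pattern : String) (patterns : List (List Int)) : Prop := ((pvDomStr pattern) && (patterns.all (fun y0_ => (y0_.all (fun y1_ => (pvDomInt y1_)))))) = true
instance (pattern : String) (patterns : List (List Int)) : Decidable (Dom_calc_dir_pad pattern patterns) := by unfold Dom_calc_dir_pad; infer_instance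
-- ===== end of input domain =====

-- B builds a frequency table of consecutive pairs of 'A'+pattern+'A' and returns the
-- weighted sum of per-pair costs times multiplicities (alternative decomposition, same cost).

-- ===== PORT A =====
-- module constant patterns_id = {'A': 0, '<': 1, '^': 2, 'v': 3, '>': 4}
def pvPatternsId : PySem.Dict Char Int :=
  PySem.Dict.ofList [('A', 0), ('<', 1), ('^', 2), ('v', 3), ('>', 4)]

-- patterns[patterns_id[a]][patterns_id[b]]  (both Pythons write this expression inline)
def pvCost (patterns : List (List Int)) (a b : Char) : Int :=
  PySem.List.pyGetD (PySem.List.pyGetD patterns (pvPatternsId.getD a 0) []) (pvPatternsId.getD b 0) 0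

def calc_dir_pad (pattern : String) (patterns : List (List Int)) : Int :=
  let st := (PySem.List.pyRange 0 (PySem.Str.len pattern) 1).foldl
    (fun (st : Int × Char) i =>
      (st.1 + pvCost patterns st.2 (PySem.List.pyGetD pattern.toList i ' '),
       PySem.List.pyGetD pattern.toList i ' '))
    (0, 'A')
  st.1 + pvCost patterns st.2 'A'

-- ===== PORT B =====
def calc_dir_pad_alt (pattern : String) (patterns : List (List Int)) : Int :=
  let seq := 'A' :: pattern.toList ++ ['A']
  let cnt := (seq.zip seq.tail).foldl
    (fun (d : PySem.Dict (Char × Char) Int) p => d.insert p (d.getD p 0 + 1)) PySem.Dict.empty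
  cnt.items.foldl (fun acc kv => acc + pvCost patterns kv.1.1 kv.1.2 * kv.2) 0

-- ===== PRECONDITION & SPEC =====
-- Pre_ is exactly the returning set of A: every consecutive pair (a,b) of 'A'+pattern+'A'
-- has both characters in patterns_id and both table lookups in range (else KeyError/IndexError).
def Pre_calc_dir_pad (pattern : String) (patterns : List (List Int)) : Prop :=
  ∀ p ∈ (('A' :: pattern.toList ++ ['A']).zip (pattern.toList ++ ['A'])),
    p.1 ∈ pvPatternsId.keys ∧ p.2 ∈ pvPatternsId.keys ∧
    PySem.Raise.InRange patterns.length (pvPatternsId.getD p.1 0) ∧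
    PySem.Raise.InRange (PySem.List.pyGetD patterns (pvPatternsId.getD p.1 0) []).length (pvPatternsId.getD p.2 0)
instance (pattern : String) (patterns : List (List Int)) : Decidable (Pre_calc_dir_pad pattern patterns) := by
  unfold Pre_calc_dir_pad; infer_instance

def pvWitness_calc_dir_pad : String × List (List Int) :=
  ("<^>", [[1, 2, 3, 4, 5], [6, 7, 8, 9, 10], [2, 2, 2, 2, 2], [3, 3, 3, 3, 3], [4, 4, 4, 4, 4]])

def Spec_calc_dir_pad (pattern : String) (patterns : List (List Int)) (out : Int) : Prop := out = calc_dir_pad_alt pattern patterns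
instance (pattern : String) (patterns : List (List Int)) (out : Int) : Decidable (Spec_calc_dir_pad pattern patterns out) := by unfold Spec_calc_dir_pad; infer_instance

-- ===== CLAIM (what is proved, stated in full; the proofs are below) =====
def Claim_equal_calc_dir_pad : Prop := ∀ (pattern : String) (patterns : List (List Int)), Dom_calc_dir_pad pattern patterns → Pre_calc_dir_pad pattern patterns → Spec_calc_dir_pad pattern patterns (calc_dir_pad pattern patterns)

-- ===== LEMMAS AND PROOFS =====

-- sum of f over consecutive pairs of l
def pvPairSum (f : Char × Char → Int) (l : List Char) : Int :=
  ((l.zip l.tail).map f).sum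

lemma pvPairSum_cons_cons (f : Char × Char → Int) (a b : Char) (l : List Char) :
    pvPairSum f (a :: b :: l) = f (a, b) + pvPairSum f (b :: l) := by
  simp [pvPairSum]

-- A's loop with trailing 'A' term computes pvPairSum over prev :: l ++ ['A']
lemma loopA (f : Char × Char → Int) (l : List Char) : ∀ (prev : Char) (ans : Int),
    (let st := l.foldl (fun (st : Int × Char) c => (st.1 + f (st.2, c), c)) (ans, prev)
     st.1 + f (st.2, 'A')) = ans + pvPairSum f (prev :: l ++ ['A']) := by
  induction l with
  | nil => intro prev ans; simp [pvPairSum]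
  | cons c l ih =>
      intro prev ans
      simpa [List.foldl_cons, pvPairSum_cons_cons, add_assoc] using ih c (ans + f (prev, c))

-- indicator sum over a nodup list
lemma sum_indicator {α : Type} [BEq α] [LawfulBEq α] (f : α → Int) (x : α) :
    ∀ (ks : List α), ks.Nodup → x ∈ ks →
      (ks.map (fun k => if k == x then f k else 0)).sum = f x := by
  intro ks
  induction ks with
  | nil => intro _ h; cases h
  | cons k ks ih =>
      intro hnd hmem
      rcases List.nodup_cons.mp hnd with ⟨hk, hnd'⟩
      rcases List.mem_cons.mp hmem with rfl | hmem'
      · have hz : (ks.map (fun k' => if k' == x then f k' else 0)).sum = 0 := by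
          apply List.sum_eq_zero
          intro y hy
          rcases List.mem_map.mp hy with ⟨k', hk', rfl⟩
          have hne : k' ≠ x := by rintro rfl; exact hk hk'
          simp [hne]
        simp [hz]
      · have hkne : k ≠ x := by rintro rfl; exact hk hmem'
        simp [hkne, ih hnd' hmem']

-- weighted count sum over the distinct elements equals the plain sum over the list
lemma sum_count_dedup {α : Type} [BEq α] [LawfulBEq α] (f : α → Int) (ks : List α) (hnd : ks.Nodup) :
    ∀ (l : List α), (∀ x ∈ l, x ∈ ks) →
      (ks.map (fun k => f k * (l.count k : Int))).sum = (l.map f).sum := by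
  intro l
  induction l with
  | nil => intro _; simp
  | cons x l ih =>
      intro hsub
      have hx : x ∈ ks := hsub x (List.mem_cons_self)
      have hsub' : ∀ y ∈ l, y ∈ ks := fun y hy => hsub y (List.mem_cons_of_mem _ hy)
      have hsplit : ∀ k : α, f k * (((x :: l).count k : Nat) : Int) =
          f k * (l.count k : Int) + (if k == x then f k else 0) := by
        intro k
        by_cases hkx : k = x
        · subst hkx; simp [List.count_cons_self]; ring
        · have hne : ¬ (x = k) := fun h => hkx h.symm
          simp [hkx, hne]
      calc (ks.map (fun k => f k * (((x :: l).count k : Nat) : Int))).sum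
          = (ks.map (fun k => f k * (l.count k : Int) + (if k == x then f k else 0))).sum := by
            exact congrArg List.sum (List.map_congr_left (fun k _ => hsplit k))
        _ = (ks.map (fun k => f k * (l.count k : Int))).sum
              + (ks.map (fun k => if k == x then f k else 0)).sum := by
            exact List.sum_map_add (l := ks) (f := fun k => f k * (l.count k : Int))
              (g := fun k => if k == x then f k else 0)
        _ = (l.map f).sum + f x := by rw [ih hsub', sum_indicator f x ks hnd hx]
        _ = ((x :: l).map f).sum := by simp [add_comm]

-- A equals the pair sum over 'A' :: pattern.toList ++ ['A']
lemma calcA_eq (pattern : String) (patterns : List (List Int)) :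
    calc_dir_pad pattern patterns
      = pvPairSum (fun p => pvCost patterns p.1 p.2) ('A' :: pattern.toList ++ ['A']) := by
  unfold calc_dir_pad
  have h := PySem.List.foldl_pyRange_zero_pyGetD' pattern.toList ' '
    (fun (st : Int × Char) c => (st.1 + pvCost patterns st.2 c, c)) ((0 : Int), 'A')
  simp only [PySem.Str.len_eq]
  rw [h]
  simpa using loopA (fun p => pvCost patterns p.1 p.2) pattern.toList 'A' 0

-- B equals the same pair sum
lemma calcB_eq (pattern : String) (patterns : List (List Int)) :
    calc_dir_pad_alt pattern patterns
      = pvPairSum (fun p => pvCost patterns p.1 p.2) ('A' :: pattern.toList ++ ['A']) := by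
  unfold calc_dir_pad_alt
  simp only [PySem.Dict.foldl_insert_getD_add_one_eq_counter, PySem.Dict.items_counter,
    PySem.List.foldl_add (g := fun kv : (Char × Char) × Int => pvCost patterns kv.1.1 kv.1.2 * kv.2)]
  set seq := 'A' :: pattern.toList ++ ['A'] with hseq
  set prs := seq.zip seq.tail with hprs
  have h2 := sum_count_dedup (fun p : Char × Char => pvCost patterns p.1 p.2)
    (PySem.Set.ofList prs) (PySem.Set.nodup_ofList prs) prs
    (fun x hx => (PySem.Set.mem_ofList prs x).mpr hx)
  simp only [List.map_map, Function.comp_def, pvPairSum, ← hprs]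
  simpa using h2

-- ===== VERDICT (by name: the statement is the Claim_ definition above) =====
theorem calc_dir_pad_spec : Claim_equal_calc_dir_pad := by
  intro pattern patterns _ _
  unfold Spec_calc_dir_pad
  rw [calcA_eq, calcB_eq]
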